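-- pv_equiv track=rewrite | github.com/svigneau/code-to-module | src/code_to_module/generate.py | _tokenize_shell
-- ===== SOURCE A (Python) =====
-- def _tokenize_shell(cmd: str) -> list[str]:
--     """Split a shell command on spaces, preserving ${...} Nextflow interpolations."""
--     tokens: list[str] = []
--     current: list[str] = []
--     depth = 0
--     i = 0
--     while i < len(cmd):
--         c = cmd[i]
--         if c == "$" and i + 1 < len(cmd) and cmd[i + 1] == "{":
--             depth += 1
--             current.append("${")
--             i += 2
--             continue
--         if depth > 0:
--             if c == "{":
--                 depth += 1
--             elif c == "}":
--                 depth -= 1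
--             current.append(c)
--         elif c == " ":
--             if current:
--                 tokens.append("".join(current))
--                 current = []
--         else:
--             current.append(c)
--         i += 1
--     if current:
--         tokens.append("".join(current))
--     return [t for t in tokens if t]
-- ===== SOURCE B (Python) =====
-- def _tokenize_shell(cmd: str) -> list[str]:
--     """Split a shell command on spaces, preserving ${...} Nextflow interpolations.
--
--     Outer loop handles only depth-0 logic; a nested inner loop consumes a whole
--     ${...} interpolation (tracking its own brace depth)."""
--     tokens: list[str] = []
--     current: list[str] = []
--     i = 0
--     n = len(cmd)
--     while i < n:
--         c = cmd[i]
--         if c == "$" and i + 1 < n and cmd[i + 1] == "{":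
--             current.append("${")
--             i += 2
--             depth = 1
--             while i < n and depth > 0:
--                 ch = cmd[i]
--                 if ch == "{":
--                     depth += 1
--                 elif ch == "}":
--                     depth -= 1
--                 current.append(ch)
--                 i += 1
--             continue
--         if c == " ":
--             if current:
--                 tokens.append("".join(current))
--                 current = []
--         else:
--             current.append(c)
--         i += 1
--     if current:
--         tokens.append("".join(current))
--     return tokens
-- ===== Notes on version B (the rewrite author's own statement) =====
-- stated objective: alternative
-- what changed: A is a single flat state machine threading a persistent depth counter across the whole scan and filtering empty tokens at the end; B splits the scan into an outer depth-0 loop plus a nested inner loop that consumes a whole ${...} interpolation with a local depth counter, so no global depth state and no final filter pass are needed.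
import Mathlib
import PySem

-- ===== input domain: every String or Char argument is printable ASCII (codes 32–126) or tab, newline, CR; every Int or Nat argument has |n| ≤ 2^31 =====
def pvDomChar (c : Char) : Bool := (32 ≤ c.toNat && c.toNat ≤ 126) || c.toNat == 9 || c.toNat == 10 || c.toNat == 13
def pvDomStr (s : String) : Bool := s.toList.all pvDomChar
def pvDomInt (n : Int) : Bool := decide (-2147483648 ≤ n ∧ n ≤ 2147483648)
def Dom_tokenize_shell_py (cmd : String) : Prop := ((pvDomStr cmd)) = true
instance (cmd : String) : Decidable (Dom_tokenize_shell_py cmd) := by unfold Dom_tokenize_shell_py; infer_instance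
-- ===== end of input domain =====

-- B restructures A's flat depth-counter state machine into an outer depth-0 loop with a
-- nested inner loop consuming each ${...} interpolation; same return value, no speed claim.

-- ===== PORT A =====
-- A's while-loop over indices, transliterated as structural recursion over the remaining
-- characters; `rest.head? = some '{'` is Python's `i + 1 < len(cmd) and cmd[i+1] == "{"`.
def tokA : List Char → List Char → Int → List String → List String
  | [], cur, _, toks =>
    (if cur = [] then toks else toks ++ [String.ofList cur]).filter (fun t => t != "")
  | c :: rest, cur, depth, toks =>
    if c = '$' ∧ rest.head? = some '{' then
      tokA rest.tail (cur ++ ['$', '{']) (depth + 1) toks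
    else if 0 < depth then
      tokA rest (cur ++ [c])
        (if c = '{' then depth + 1 else if c = '}' then depth - 1 else depth) toks
    else if c = ' ' then
      tokA rest [] depth (if cur = [] then toks else toks ++ [String.ofList cur])
    else
      tokA rest (cur ++ [c]) depth toks
termination_by l => l.length
decreasing_by
  · simp only [List.length_cons]
    have : rest.tail.length ≤ rest.length := by
      cases rest <;> simp
    omega
  all_goals simp

def tokenize_shell_py (cmd : String) : List String := tokA cmd.toList [] 0 []

-- ===== PORT B =====
-- B's nested inner loop: consumes the body of a ${...} interpolation, appending every
-- character and tracking a local brace depth; returns (current, remaining input).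
def innerB : List Char → Int → List Char → List Char × List Char
  | [], _, acc => (acc, [])
  | c :: rest, depth, acc =>
    if 0 < depth then
      innerB rest (if c = '{' then depth + 1 else if c = '}' then depth - 1 else depth)
        (acc ++ [c])
    else (acc, c :: rest)

theorem innerB_snd_len : ∀ (l : List Char) (d : Int) (acc : List Char),
    (innerB l d acc).2.length ≤ l.length := by
  intro l
  induction l with
  | nil => intro d acc; simp [innerB]
  | cons c rest ih =>
    intro d acc
    simp only [innerB]
    split
    · exact Nat.le_succ_of_le (ih _ _)
    · simp

-- B's outer loop: only depth-0 logic; on '${' it calls the inner loop and resumes.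
def tokB : List Char → List Char → List String → List String
  | [], cur, toks => if cur = [] then toks else toks ++ [String.ofList cur]
  | c :: rest, cur, toks =>
    if c = '$' ∧ rest.head? = some '{' then
      let p := innerB rest.tail 1 (cur ++ ['$', '{'])
      tokB p.2 p.1 toks
    else if c = ' ' then
      tokB rest [] (if cur = [] then toks else toks ++ [String.ofList cur])
    else
      tokB rest (cur ++ [c]) toks
termination_by l => l.length
decreasing_by
  · simp only [List.length_cons]
    have h1 := innerB_snd_len rest.tail 1 (cur ++ ['$', '{'])
    have h2 : rest.tail.length ≤ rest.length := by
      cases rest <;> simp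
    omega
  all_goals simp

def tokenize_shell_py_alt (cmd : String) : List String := tokB cmd.toList [] []

-- ===== PRECONDITION & SPEC =====
def Spec_tokenize_shell_py (cmd : String) (out : List String) : Prop := out = tokenize_shell_py_alt cmd
instance (cmd : String) (out : List String) : Decidable (Spec_tokenize_shell_py cmd out) := by unfold Spec_tokenize_shell_py; infer_instance

-- ===== CLAIM (what is proved, stated in full; the proofs are below) =====
def Claim_equal_tokenize_shell_py : Prop := ∀ (cmd : String), Dom_tokenize_shell_py cmd → Spec_tokenize_shell_py cmd (tokenize_shell_py cmd)

-- ===== LEMMAS AND PROOFS =====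

theorem innerB_zero : ∀ (l acc : List Char), innerB l 0 acc = (acc, l) := by
  intro l acc; cases l <;> simp [innerB]

theorem mk_ne_empty {cur : List Char} (h : cur ≠ []) : String.ofList cur ≠ "" := by
  intro hc
  apply h
  have := congrArg String.toList hc
  simpa using this

-- While depth > 0, A's flat loop does exactly what B's inner loop does, then continues at depth 0.
theorem tokA_pos : ∀ (n : ℕ) (l : List Char), l.length ≤ n →
    ∀ (d : Int), 0 < d → ∀ (cur : List Char) (toks : List String),
    tokA l cur d toks = tokA (innerB l d cur).2 (innerB l d cur).1 0 toks := by
  intro n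
  induction n with
  | zero =>
    intro l hl d hd cur toks
    have : l = [] := List.eq_nil_of_length_eq_zero (Nat.le_zero.mp hl)
    subst this; simp [innerB, tokA]
  | succ n ih =>
    intro l hl d hd cur toks
    cases l with
    | nil => simp [innerB, tokA]
    | cons c rest =>
      by_cases hbr : c = '$' ∧ rest.head? = some '{'
      · obtain ⟨hc, hh⟩ := hbr
        cases rest with
        | nil => simp at hh
        | cons c2 rest2 =>
          simp only [List.head?_cons, Option.some.injEq] at hh
          subst hc hh
          have h1 : tokA ('$' :: '{' :: rest2) cur d toks
              = tokA rest2 (cur ++ ['$', '{']) (d + 1) toks := by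
            simp [tokA]
          have h2 : innerB ('$' :: '{' :: rest2) d cur
              = innerB rest2 (d + 1) (cur ++ ['$', '{']) := by
            have hd' : 0 < d := hd
            simp only [innerB, if_pos hd']
            have : ('$' : Char) ≠ '{' ∧ ('$' : Char) ≠ '}' := by decide
            rw [if_neg this.1, if_neg this.2, if_pos hd]
            have : (('{' : Char) = '{') := rfl
            simp [List.append_assoc]
          rw [h1, h2]
          have hlen : rest2.length ≤ n := by
            simp only [List.length_cons] at hl; omega
          exact ih rest2 hlen (d + 1) (by omega) _ toks
      · have h1 : tokA (c :: rest) cur d toks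
            = tokA rest (cur ++ [c])
                (if c = '{' then d + 1 else if c = '}' then d - 1 else d) toks := by
          simp only [tokA, if_neg hbr, if_pos hd]
        have h2 : innerB (c :: rest) d cur
            = innerB rest (if c = '{' then d + 1 else if c = '}' then d - 1 else d)
                (cur ++ [c]) := by
          simp only [innerB, if_pos hd]
        set d' : Int := if c = '{' then d + 1 else if c = '}' then d - 1 else d with hd'
        rw [h1, h2]
        by_cases hz : d' = 0
        · rw [hz, innerB_zero]
        · have hpos : 0 < d' := by
            rw [hd'] at hz ⊢
            split_ifs at hz ⊢ <;> omega
          have hlen : rest.length ≤ n := by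
            have h3 : rest.length + 1 ≤ n + 1 := by simpa using hl
            omega
          exact ih rest hlen d' hpos _ toks

-- At depth 0 the two loops agree, given every already-flushed token is nonempty.
theorem tokA_eq_tokB : ∀ (n : ℕ) (l : List Char), l.length ≤ n →
    ∀ (cur : List Char) (toks : List String), (∀ t ∈ toks, t ≠ "") →
    tokA l cur 0 toks = tokB l cur toks := by
  intro n
  induction n with
  | zero =>
    intro l hl cur toks htoks
    have : l = [] := List.eq_nil_of_length_eq_zero (Nat.le_zero.mp hl)
    subst this
    simp only [tokA, tokB]
    split
    · exact List.filter_eq_self.mpr (fun t ht => by simpa using htoks t ht)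
    · refine List.filter_eq_self.mpr (fun t ht => ?_)
      rcases List.mem_append.mp ht with h | h
      · simpa using htoks t h
      · simp only [List.mem_singleton] at h
        subst h
        simpa using mk_ne_empty (by assumption)
  | succ n ih =>
    intro l hl cur toks htoks
    cases l with
    | nil =>
      simp only [tokA, tokB]
      split
      · exact List.filter_eq_self.mpr (fun t ht => by simpa using htoks t ht)
      · refine List.filter_eq_self.mpr (fun t ht => ?_)
        rcases List.mem_append.mp ht with h | h
        · simpa using htoks t h
        · simp only [List.mem_singleton] at h
          subst h
          simpa using mk_ne_empty (by assumption)
    | cons c rest =>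
      have hlen : rest.length ≤ n := by
        simp only [List.length_cons] at hl; omega
      by_cases hbr : c = '$' ∧ rest.head? = some '{'
      · obtain ⟨hc, hh⟩ := hbr
        cases rest with
        | nil => simp at hh
        | cons c2 rest2 =>
          simp only [List.head?_cons, Option.some.injEq] at hh
          subst hc hh
          have hA : tokA ('$' :: '{' :: rest2) cur 0 toks
              = tokA rest2 (cur ++ ['$', '{']) 1 toks := by
            simp [tokA]
          have hB : tokB ('$' :: '{' :: rest2) cur toks
              = tokB (innerB rest2 1 (cur ++ ['$', '{'])).2
                     (innerB rest2 1 (cur ++ ['$', '{'])).1 toks := by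
            simp [tokB]
          rw [hA, hB]
          have hlen2 : rest2.length ≤ n := by
            simp at hl; omega
          rw [tokA_pos rest2.length rest2 le_rfl 1 one_pos]
          exact ih _ (le_trans (innerB_snd_len _ _ _) hlen2) _ toks htoks
      · by_cases hsp : c = ' '
        · subst hsp
          have hA : tokA (' ' :: rest) cur 0 toks
              = tokA rest [] 0 (if cur = [] then toks else toks ++ [String.ofList cur]) := by
            simp only [tokA, if_neg hbr]
            norm_num
          have hB : tokB (' ' :: rest) cur toks
              = tokB rest [] (if cur = [] then toks else toks ++ [String.ofList cur]) := by
            simp only [tokB, if_neg hbr]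
            norm_num
          rw [hA, hB]
          refine ih rest hlen [] _ ?_
          intro t ht
          split at ht
          · exact htoks t ht
          · rcases List.mem_append.mp ht with h | h
            · exact htoks t h
            · simp only [List.mem_singleton] at h
              subst h
              exact mk_ne_empty (by assumption)
        · have hA : tokA (c :: rest) cur 0 toks
              = tokA rest (cur ++ [c]) 0 toks := by
            simp only [tokA, if_neg hbr, if_neg hsp]
            norm_num
          have hB : tokB (c :: rest) cur toks
              = tokB rest (cur ++ [c]) toks := by
            simp only [tokB, if_neg hbr, if_neg hsp]
          rw [hA, hB]
          exact ih rest hlen _ toks htoks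

-- ===== VERDICT (by name: the statement is the Claim_ definition above) =====
theorem tokenize_shell_py_spec : Claim_equal_tokenize_shell_py := by
  intro cmd _
  unfold Spec_tokenize_shell_py tokenize_shell_py tokenize_shell_py_alt
  exact tokA_eq_tokB cmd.toList.length cmd.toList le_rfl [] [] (by simp)
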